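-- pv_equiv track=rewrite | github.com/redis-applied-ai/redis-sre-agent | redis_sre_agent/core/targets.py | _contains_token_sequence
-- ===== SOURCE A (Python) =====
-- from typing import Any, Awaitable, Callable, Dict, Iterable, List, Optional, Sequence
--
-- def _contains_token_sequence(haystack: Sequence[str], needle: Sequence[str]) -> bool:
--     """Return True when `needle` appears contiguously inside `haystack`."""
--     if not needle or len(needle) > len(haystack):
--         return False
--     needle_list = list(needle)
--     window = len(needle_list)
--     for index in range(len(haystack) - window + 1):
--         if list(haystack[index : index + window]) == needle_list:
--             return True
--     return False
-- ===== SOURCE B (Python) =====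
-- def _contains_token_sequence(haystack, needle):
--     """Return True when `needle` appears contiguously inside `haystack`."""
--     needle = list(needle)
--     if not needle:
--         return False
--     suffix = list(haystack)
--     while len(suffix) >= len(needle):
--         if all(a == b for a, b in zip(suffix, needle)):
--             return True
--         suffix.pop(0)
--     return False
-- ===== Notes on version B (the rewrite author's own statement) =====
-- stated objective: alternative
-- what changed: Replaces the index loop that materialises and compares a fresh window slice at every position with a suffix recursion that does an early-exit element-wise prefix check and no slicing or index arithmetic.
import Mathlib
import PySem

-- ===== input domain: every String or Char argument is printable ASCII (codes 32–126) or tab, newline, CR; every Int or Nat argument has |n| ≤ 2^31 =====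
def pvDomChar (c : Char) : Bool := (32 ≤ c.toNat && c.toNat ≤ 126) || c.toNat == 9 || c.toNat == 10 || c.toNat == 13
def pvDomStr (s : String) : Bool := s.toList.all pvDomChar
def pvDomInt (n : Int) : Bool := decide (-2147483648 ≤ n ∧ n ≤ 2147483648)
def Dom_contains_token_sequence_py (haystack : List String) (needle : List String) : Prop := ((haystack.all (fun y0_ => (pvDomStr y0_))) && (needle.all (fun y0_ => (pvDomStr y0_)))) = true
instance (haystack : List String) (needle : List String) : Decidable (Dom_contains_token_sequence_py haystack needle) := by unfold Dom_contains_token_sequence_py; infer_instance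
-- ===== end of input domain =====

-- B replaces the per-index window slicing with a suffix recursion doing an early-exit prefix check; same return value everywhere.

-- ===== PORT A =====
-- for index in range(len(haystack) - window + 1): if list(haystack[index:index+window]) == needle_list: return True
def contains_token_sequence_py (haystack : List String) (needle : List String) : Bool :=
  if needle.isEmpty || needle.length > haystack.length then false
  else
    (PySem.List.pyRange 0 ((haystack.length : Int) - (needle.length : Int) + 1) 1).any
      (fun index => PySem.List.slice haystack (some index) (some (index + (needle.length : Int))) == needle)

-- ===== PORT B =====
-- while len(suffix) >= len(needle): if all(a == b for a, b in zip(suffix, needle)): return True; suffix.pop(0)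
def ctsLoop (needle : List String) : List String → Bool
  | [] => needle.isEmpty
  | s :: t =>
    if needle.length ≤ (s :: t).length then
      if ((s :: t).zip needle).all (fun p => p.1 == p.2) then true
      else ctsLoop needle t
    else false

def contains_token_sequence_py_alt (haystack : List String) (needle : List String) : Bool :=
  if needle.isEmpty then false
  else ctsLoop needle haystack

-- ===== PRECONDITION & SPEC =====
def Spec_contains_token_sequence_py (haystack : List String) (needle : List String) (out : Bool) : Prop := out = contains_token_sequence_py_alt haystack needle
instance (haystack : List String) (needle : List String) (out : Bool) : Decidable (Spec_contains_token_sequence_py haystack needle out) := by unfold Spec_contains_token_sequence_py; infer_instance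

-- ===== CLAIM (what is proved, stated in full; the proofs are below) =====
def Claim_equal_contains_token_sequence_py : Prop := ∀ (haystack : List String) (needle : List String), Dom_contains_token_sequence_py haystack needle → Spec_contains_token_sequence_py haystack needle (contains_token_sequence_py haystack needle)

-- ===== LEMMAS AND PROOFS =====

-- the zip-based element-wise check is a prefix test once the length guard holds
lemma zip_all_eq_iff_prefix (s n : List String) (h : n.length ≤ s.length) :
    ((s.zip n).all (fun p => p.1 == p.2) = true) ↔ n <+: s := by
  induction n generalizing s with
  | nil => simp
  | cons a n ih =>
    cases s with
    | nil => simp at h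
    | cons b s =>
      simp only [List.zip_cons_cons, List.all_cons, Bool.and_eq_true, beq_iff_eq,
        List.cons_prefix_cons]
      simp only [List.length_cons, Nat.add_le_add_iff_right] at h
      rw [ih s h]
      tauto

lemma ctsLoop_iff (needle : List String) (hne : needle ≠ []) (s : List String) :
    ctsLoop needle s = true ↔ ∃ i, needle <+: s.drop i := by
  induction s with
  | nil =>
    rw [show ctsLoop needle [] = false by simp [ctsLoop, hne]]
    constructor
    · intro h; cases h
    · rintro ⟨i, hi⟩
      exfalso
      have := hi.length_le
      simp at this
      exact hne this
  | cons x t ih =>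
    have hunf : ctsLoop needle (x :: t) =
        (if needle.length ≤ (x :: t).length then
          (if ((x :: t).zip needle).all (fun p => p.1 == p.2) then true else ctsLoop needle t)
        else false) := rfl
    by_cases hlen : needle.length ≤ (x :: t).length
    · rw [hunf, if_pos hlen]
      constructor
      · intro h
        by_cases hp : ((x :: t).zip needle).all (fun p => p.1 == p.2) = true
        · exact ⟨0, by simpa using (zip_all_eq_iff_prefix _ _ hlen).1 hp⟩
        · rw [if_neg hp] at h
          obtain ⟨i, hi⟩ := ih.1 h
          exact ⟨i + 1, by simpa using hi⟩
      · rintro ⟨i, hi⟩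
        cases i with
        | zero =>
          simp only [List.drop_zero] at hi
          rw [if_pos ((zip_all_eq_iff_prefix _ _ hlen).2 hi)]
        | succ i =>
          simp only [List.drop_succ_cons] at hi
          have := ih.2 ⟨i, hi⟩
          split <;> simp [this]
    · rw [hunf, if_neg hlen]
      constructor
      · intro h; cases h
      · rintro ⟨i, h⟩
        exfalso
        have h1 := h.length_le
        have h2 : (List.drop i (x :: t)).length ≤ (x :: t).length := by
          simp [List.length_drop]
        omega

lemma portA_iff (haystack needle : List String) (hne : needle ≠ [])
    (hlen : needle.length ≤ haystack.length) :
    contains_token_sequence_py haystack needle = true ↔ ∃ i, needle <+: haystack.drop i := by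
  rw [show contains_token_sequence_py haystack needle =
      (PySem.List.pyRange 0 ((haystack.length : Int) - (needle.length : Int) + 1) 1).any
        (fun index => PySem.List.slice haystack (some index) (some (index + (needle.length : Int))) == needle) by
    simp [contains_token_sequence_py, List.isEmpty_iff, hne]
    omega]
  rw [List.any_eq_true]
  constructor
  · rintro ⟨i, hi, hslice⟩
    rw [PySem.List.mem_pyRange_one] at hi
    obtain ⟨hi0, _⟩ := hi
    obtain ⟨j, rfl⟩ : ∃ j : Nat, i = (j : Int) := ⟨i.toNat, (Int.toNat_of_nonneg hi0).symm⟩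
    rw [PySem.List.slice_natCast_add, beq_iff_eq] at hslice
    exact ⟨j, List.prefix_iff_eq_take.2 hslice.symm⟩
  · rintro ⟨i, hi⟩
    have hlenle := hi.length_le
    rw [List.length_drop] at hlenle
    refine ⟨(i : Int), ?_, ?_⟩
    · rw [PySem.List.mem_pyRange_one]
      have hnl : 0 < needle.length := List.length_pos_iff.2 hne
      constructor
      · exact Int.natCast_nonneg i
      · omega
    · rw [PySem.List.slice_natCast_add, beq_iff_eq]
      exact ((List.prefix_iff_eq_take.1 hi)).symm

lemma portB_iff (haystack needle : List String) (hne : needle ≠ []) :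
    contains_token_sequence_py_alt haystack needle = true ↔ ∃ i, needle <+: haystack.drop i := by
  rw [show contains_token_sequence_py_alt haystack needle = ctsLoop needle haystack by
    simp [contains_token_sequence_py_alt, List.isEmpty_iff, hne]]
  exact ctsLoop_iff needle hne haystack

-- ===== VERDICT (by name: the statement is the Claim_ definition above) =====
theorem contains_token_sequence_py_spec : Claim_equal_contains_token_sequence_py := by
  intro haystack needle _
  unfold Spec_contains_token_sequence_py
  by_cases hne : needle = []
  · subst hne
    simp [contains_token_sequence_py, contains_token_sequence_py_alt]
  · by_cases hlen : needle.length ≤ haystack.length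
    · rw [Bool.eq_iff_iff, portA_iff haystack needle hne hlen, portB_iff haystack needle hne]
    · rw [show contains_token_sequence_py haystack needle = false by
        unfold contains_token_sequence_py
        rw [if_pos]
        simp only [Bool.or_eq_true, decide_eq_true_eq]
        right; omega]
      rw [Bool.eq_iff_iff]
      constructor
      · intro h; cases h
      · intro h
        exfalso
        rw [portB_iff haystack needle hne] at h
        obtain ⟨i, hi⟩ := h
        have h1 := hi.length_le
        rw [List.length_drop] at h1
        omega
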